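-- pv_equiv track=rewrite | github.com/houtadono/Python-Programming-CodePtit | BIẾN VÀ KIỂU DỮ LIỆU ĐƠN GIẢN/PY01071.py | check
-- ===== SOURCE A (Python) =====
-- from string import ascii_lowercase
--
-- def check(s):
--     if not str(s).endswith('.py'):
--         return False
--     key = ascii_lowercase+'_'
--     for i in s[:-3]:
--         if i not in key:
--             return False
--     return True
-- ===== SOURCE B (Python) =====
-- import re
--
-- def check(s):
--     if not str(s).endswith('.py'):
--         return False
--     return re.fullmatch('[a-z_]*', s[:-3]) is not None
-- ===== Notes on version B (the rewrite author's own statement) =====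
-- stated objective: idiomatic
-- what changed: The explicit per-character loop testing membership in ascii_lowercase plus underscore is replaced by a single regex fullmatch of the lowercase-or-underscore class over the prefix before the extension.
import Mathlib
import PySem

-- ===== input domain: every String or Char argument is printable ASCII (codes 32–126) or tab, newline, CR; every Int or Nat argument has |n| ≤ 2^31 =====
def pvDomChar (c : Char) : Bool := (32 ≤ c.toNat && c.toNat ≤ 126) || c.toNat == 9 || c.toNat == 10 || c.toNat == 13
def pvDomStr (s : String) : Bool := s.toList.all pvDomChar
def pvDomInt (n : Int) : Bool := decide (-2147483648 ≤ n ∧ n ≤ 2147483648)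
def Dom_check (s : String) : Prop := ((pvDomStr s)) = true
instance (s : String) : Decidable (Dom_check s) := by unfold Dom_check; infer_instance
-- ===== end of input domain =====

-- B replaces A's per-character membership loop with one regex fullmatch of [a-z_]* over the prefix s[:-3] (idiomatic).

-- ===== PORT A =====
-- key = ascii_lowercase + '_' (the 27 characters, spelled out)
def asciiKey : List Char := ['a','b','c','d','e','f','g','h','i','j','k','l','m','n','o','p','q','r','s','t','u','v','w','x','y','z','_']

-- the 'for i in s[:-3]: if i not in key: return False' loop, with its early return
def checkLoop (key : List Char) : List Char → Bool
  | [] => true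
  | c :: rest => if !(key.contains c) then false else checkLoop key rest

def check (s : String) : Bool :=
  if !(PySem.Str.endswith s ".py") then false
  else checkLoop asciiKey (PySem.Chars.slice s.toList none (some (-3)))

-- ===== PORT B =====
-- re.fullmatch('[a-z_]*', s[:-3]) is not None ⟺ every char of s[:-3] is in the class [a-z_]
def check_alt (s : String) : Bool :=
  if !(PySem.Str.endswith s ".py") then false
  else
    (PySem.Chars.slice s.toList none (some (-3))).all
      (fun c => ('a' ≤ c && c ≤ 'z') || c == '_')

-- ===== PRECONDITION & SPEC =====
def Spec_check (s : String) (out : Bool) : Prop := out = check_alt s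
instance (s : String) (out : Bool) : Decidable (Spec_check s out) := by unfold Spec_check; infer_instance

-- ===== CLAIM (what is proved, stated in full; the proofs are below) =====
def Claim_equal_check : Prop := ∀ (s : String), Dom_check s → Spec_check s (check s)

-- ===== LEMMAS AND PROOFS =====

-- membership in ascii_lowercase+'_' is exactly the character class [a-z_]
theorem mem_asciiKey_iff (c : Char) :
    (asciiKey.contains c) = (('a' ≤ c && c ≤ 'z') || c == '_') := by
  have hle : ∀ a b : Char, (a ≤ b) ↔ a.toNat ≤ b.toNat := by
    intro a b; rw [Char.le_def, UInt32.le_iff_toNat_le]; rfl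
  have heq : ∀ a b : Char, (a = b) ↔ a.toNat = b.toNat := by
    intro a b
    exact ⟨fun h => h ▸ rfl, fun h => Char.ext (UInt32.toNat_inj.mp h)⟩
  rw [Bool.eq_iff_iff]
  simp only [asciiKey, List.contains_eq_mem, List.mem_cons, List.not_mem_nil, or_false,
    Bool.or_eq_true, Bool.and_eq_true, decide_eq_true_eq, beq_iff_eq, hle, heq]
  have h_97 : ('a'.toNat) = 97 := rfl
  have h_98 : ('b'.toNat) = 98 := rfl
  have h_99 : ('c'.toNat) = 99 := rfl
  have h_100 : ('d'.toNat) = 100 := rfl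
  have h_101 : ('e'.toNat) = 101 := rfl
  have h_102 : ('f'.toNat) = 102 := rfl
  have h_103 : ('g'.toNat) = 103 := rfl
  have h_104 : ('h'.toNat) = 104 := rfl
  have h_105 : ('i'.toNat) = 105 := rfl
  have h_106 : ('j'.toNat) = 106 := rfl
  have h_107 : ('k'.toNat) = 107 := rfl
  have h_108 : ('l'.toNat) = 108 := rfl
  have h_109 : ('m'.toNat) = 109 := rfl
  have h_110 : ('n'.toNat) = 110 := rfl
  have h_111 : ('o'.toNat) = 111 := rfl
  have h_112 : ('p'.toNat) = 112 := rfl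
  have h_113 : ('q'.toNat) = 113 := rfl
  have h_114 : ('r'.toNat) = 114 := rfl
  have h_115 : ('s'.toNat) = 115 := rfl
  have h_116 : ('t'.toNat) = 116 := rfl
  have h_117 : ('u'.toNat) = 117 := rfl
  have h_118 : ('v'.toNat) = 118 := rfl
  have h_119 : ('w'.toNat) = 119 := rfl
  have h_120 : ('x'.toNat) = 120 := rfl
  have h_121 : ('y'.toNat) = 121 := rfl
  have h_122 : ('z'.toNat) = 122 := rfl
  have h_95 : ('_'.toNat) = 95 := rfl
  simp only [h_97, h_98, h_99, h_100, h_101, h_102, h_103, h_104, h_105, h_106, h_107, h_108, h_109, h_110, h_111, h_112, h_113, h_114, h_115, h_116, h_117, h_118, h_119, h_120, h_121, h_122, h_95] 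
  omega

-- A's early-return loop equals B's all-over-the-list check
theorem checkLoop_eq_all (cs : List Char) :
    checkLoop asciiKey cs = cs.all (fun c => ('a' ≤ c && c ≤ 'z') || c == '_') := by
  induction cs with
  | nil => rfl
  | cons c rest ih =>
    simp only [checkLoop, List.all_cons, mem_asciiKey_iff, ← ih]
    cases h : (('a' ≤ c && c ≤ 'z') || c == '_') <;> simp

-- ===== VERDICT (by name: the statement is the Claim_ definition above) =====
theorem check_spec : Claim_equal_check := by
  intro s _
  unfold Spec_check check check_alt
  split
  · rfl
  · exact checkLoop_eq_all _
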